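-- pv_equiv track=rewrite | github.com/junh9541/Algorithm-Study | 프로그래머스/1/42840. 모의고사/모의고사.py | solution
-- ===== SOURCE A (Python) =====
-- def solution(answers):
--
--     p1=[1, 2, 3, 4, 5]
--     p2=[2, 1, 2, 3, 2, 4, 2, 5]
--     p3=[3, 3, 1, 1, 2, 2, 4, 4, 5, 5]
--
--     score=[0, 0, 0]
--
--     for i, elem in enumerate(answers):
--         if p1[i%5]==elem:
--             score[0]+=1
--         if p2[i%8]==elem:
--             score[1]+=1
--         if p3[i%10]==elem:
--             score[2]+=1
--
--     answer = []
--
--     maxSc=max(score)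
--     for i in range(0, 3):
--         if score[i]==maxSc:
--             answer.append(i+1)
--
--     return answer
-- ===== SOURCE B (Python) =====
-- def solution(answers):
--     patterns = [[1, 2, 3, 4, 5],
--                 [2, 1, 2, 3, 2, 4, 2, 5],
--                 [3, 3, 1, 1, 2, 2, 4, 4, 5, 5]]
--     scores = []
--     for p in patterns:
--         s = 0
--         rem = p            # remaining suffix of the current pattern cycle
--         for a in answers:
--             if not rem:    # cycle exhausted: start the pattern over
--                 rem = p
--             if rem[0] == a:
--                 s += 1
--             rem = rem[1:]
--         scores.append(s)
--     m = max(scores)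
--     return [i + 1 for i, s in enumerate(scores) if s == m]
-- ===== Notes on version B (the rewrite author's own statement) =====
-- stated objective: alternative
-- what changed: A walks the answers once with modular indexing (p[i % len(p)]) into fixed patterns, updating a 3-slot score list; B never indexes by position at all: per pattern it carries the remaining suffix of the current pattern cycle as its loop state, comparing each answer to the suffix head and refilling the suffix when it runs out, then picks the winners from the score list.
import Mathlib
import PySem

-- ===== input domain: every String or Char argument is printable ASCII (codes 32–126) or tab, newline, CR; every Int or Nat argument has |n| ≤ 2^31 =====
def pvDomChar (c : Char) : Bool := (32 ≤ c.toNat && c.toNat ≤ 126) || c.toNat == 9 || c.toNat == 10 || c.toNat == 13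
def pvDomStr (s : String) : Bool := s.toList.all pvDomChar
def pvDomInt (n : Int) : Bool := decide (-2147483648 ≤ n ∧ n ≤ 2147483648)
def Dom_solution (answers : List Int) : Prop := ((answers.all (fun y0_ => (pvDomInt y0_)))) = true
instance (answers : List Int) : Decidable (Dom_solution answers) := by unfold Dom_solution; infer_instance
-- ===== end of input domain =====

-- B replaces A's modular indexing p[i % len(p)] over one interleaved pass by, per pattern,
-- a suffix-carrying scan: the loop state is the rest of the current pattern cycle, refilled
-- when exhausted (objective: alternative algorithmic mechanism, same cost).

-- ===== PORT A =====
-- literal transliteration: the score list becomes a triple (score[0], score[1], score[2])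
def solution (answers : List Int) : List Int :=
  let p1 : List Int := [1, 2, 3, 4, 5]
  let p2 : List Int := [2, 1, 2, 3, 2, 4, 2, 5]
  let p3 : List Int := [3, 3, 1, 1, 2, 2, 4, 4, 5, 5]
  let score : Int × Int × Int :=
    (PySem.List.enumerate answers 0).foldl
      (fun s ie =>
        let s1 := if PySem.List.pyGet? p1 (PySem.Int.mod ie.1 5) == some ie.2
                  then (s.1 + 1, s.2.1, s.2.2) else s
        let s2 := if PySem.List.pyGet? p2 (PySem.Int.mod ie.1 8) == some ie.2
                  then (s1.1, s1.2.1 + 1, s1.2.2) else s1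
        if PySem.List.pyGet? p3 (PySem.Int.mod ie.1 10) == some ie.2
        then (s2.1, s2.2.1, s2.2.2 + 1) else s2)
      (0, 0, 0)
  let maxSc : Int := max score.1 (max score.2.1 score.2.2)
  let answer : List Int :=
    (PySem.List.pyRange 0 3 1).foldl
      (fun acc i =>
        if (if i = 0 then score.1 else if i = 1 then score.2.1 else score.2.2) = maxSc
        then acc ++ [i + 1] else acc)
      []
  answer

-- ===== PORT B =====
-- B's inner loop: state (s, rem) where rem is the remaining suffix of the current pattern
-- cycle; 'rem[0] == a' is exact as 'rem.head? == some a' since rem is refilled (nonempty)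
-- whenever it is empty.
def cycScore (p : List Int) (answers : List Int) : Int :=
  (answers.foldl
    (fun (st : Int × List Int) a =>
      let rem := if st.2 = [] then p else st.2
      ((if rem.head? == some a then st.1 + 1 else st.1), rem.tail))
    ((0 : Int), p)).1

def solution_alt (answers : List Int) : List Int :=
  let scores : List Int :=
    [cycScore [1, 2, 3, 4, 5] answers,
     cycScore [2, 1, 2, 3, 2, 4, 2, 5] answers,
     cycScore [3, 3, 1, 1, 2, 2, 4, 4, 5, 5] answers]
  let m : Int := ((PySem.List.max? scores (fun y => y)).getD 0)
  (PySem.List.enumerate scores 0).filterMap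
    (fun is => if is.2 = m then some (is.1 + 1) else none)

-- ===== PRECONDITION & SPEC =====
def Spec_solution (answers : List Int) (out : List Int) : Prop := out = solution_alt answers
instance (answers : List Int) (out : List Int) : Decidable (Spec_solution answers out) := by unfold Spec_solution; infer_instance

-- ===== CLAIM (what is proved, stated in full; the proofs are below) =====
def Claim_equal_solution : Prop := ∀ (answers : List Int), Dom_solution answers → Spec_solution answers (solution answers)

-- ===== LEMMAS AND PROOFS =====

-- A's interleaved triple-accumulator fold is the triple of the three independent counts
lemma foldl_triple_count (f g h : Int × Int → Bool) :
    ∀ (l : List (Int × Int)) (a b c : Int),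
      l.foldl
        (fun s ie =>
          let s1 := if f ie then (s.1 + 1, s.2.1, s.2.2) else s
          let s2 := if g ie then (s1.1, s1.2.1 + 1, s1.2.2) else s1
          if h ie then (s2.1, s2.2.1, s2.2.2 + 1) else s2)
        (a, b, c)
      = (a + (l.countP f : Int), b + (l.countP g : Int), c + (l.countP h : Int)) := by
  intro l
  induction l with
  | nil => intro a b c; simp
  | cons x t ih =>
      intro a b c
      simp only [List.foldl_cons, List.countP_cons]
      cases hf : f x <;> cases hg : g x <;> cases hh : h x <;>
        simp [ih, Prod.ext_iff] <;> omega

-- loop invariant for B's suffix-carrying scan: starting from the suffix p.drop r with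
-- r ≡ k (mod |p|), it adds exactly the count of positions matching p[i % |p|] from index k on
lemma cyc_invariant (p : List Int) (hp : p ≠ []) :
    ∀ (l : List Int) (r k : Nat) (s : Int), r ≤ p.length → k % p.length = r % p.length →
      (l.foldl
        (fun (st : Int × List Int) a =>
          let rem := if st.2 = [] then p else st.2
          ((if rem.head? == some a then st.1 + 1 else st.1), rem.tail))
        (s, p.drop r)).1
      = s + ((PySem.List.enumerate l (k : Int)).countP
              (fun ia => PySem.List.pyGet? p (PySem.Int.mod ia.1 (p.length : Int)) == some ia.2) : Int) := by
  intro l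
  have hn : 0 < p.length := List.length_pos_of_ne_nil hp
  induction l with
  | nil => intro r k s _ _; simp [PySem.List.enumerate_nil]
  | cons a t ih =>
      intro r k s hr hk
      rw [PySem.List.enumerate_cons, List.foldl_cons, List.countP_cons]
      dsimp only
      have hmod : PySem.Int.mod (k : Int) (p.length : Int) = ((k % p.length : Nat) : Int) :=
        PySem.Int.mod_natCast k p.length
      by_cases hre : r = p.length
      · -- suffix exhausted: refill with p; the position index is ≡ 0 mod |p|
        have hdrop : p.drop r = ([] : List Int) := by simp [hre]
        have hk0 : k % p.length = 0 := by rw [hk, hre]; exact Nat.mod_self _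
        have hhead : p.head? = PySem.List.pyGet? p (PySem.Int.mod (k : Int) (p.length : Int)) := by
          rw [hmod, hk0]
          simp [PySem.List.pyGet?_zero, List.head?_eq_getElem?]
        have hih := ih 1 (k + 1) (if p.head? == some a then s + 1 else s) hn
          (by rw [Nat.add_mod, hk0, Nat.zero_add, Nat.mod_mod_of_dvd 1 dvd_rfl])
        push_cast at hih
        rw [List.drop_one] at hih
        rw [hdrop]
        simp only [reduceIte]
        rw [hih, ← hhead]
        split_ifs <;> push_cast <;> ring
      · -- suffix nonempty: its head is p[r] = p[k % |p|]
        have hrlt : r < p.length := lt_of_le_of_ne hr hre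
        have hne : ¬ (p.drop r = ([] : List Int)) := by
          simp [List.drop_eq_nil_iff]; omega
        have hkr : k % p.length = r := by rw [hk, Nat.mod_eq_of_lt hrlt]
        have hhead : (p.drop r).head? = PySem.List.pyGet? p (PySem.Int.mod (k : Int) (p.length : Int)) := by
          rw [hmod, hkr]
          simp [PySem.List.pyGet?_natCast, List.head?_eq_getElem?, List.getElem?_drop]
        have hih := ih (r + 1) (k + 1) (if (p.drop r).head? == some a then s + 1 else s) (by omega)
          (by rw [Nat.add_mod, Nat.add_mod r, hkr, Nat.mod_eq_of_lt hrlt])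
        push_cast at hih
        rw [if_neg hne, List.tail_drop, hih, ← hhead]
        split_ifs <;> push_cast <;> ring

-- B's score is the count of matching positions (modular characterisation)
lemma cycScore_eq_countP (p : List Int) (hp : p ≠ []) (answers : List Int) :
    cycScore p answers
      = ((PySem.List.enumerate answers 0).countP
          (fun ia => PySem.List.pyGet? p (PySem.Int.mod ia.1 (p.length : Int)) == some ia.2) : Int) := by
  unfold cycScore
  have := cyc_invariant p hp answers 0 0 0 (Nat.zero_le _) rfl
  simpa using this

-- both tails — A's range-append loop and B's enumerate comprehension — pick the same winners
lemma winners_glue (c1 c2 c3 : Int) :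
    (PySem.List.pyRange 0 3 1).foldl
      (fun acc i =>
        if (if i = 0 then c1 else if i = 1 then c2 else c3) = max c1 (max c2 c3)
        then acc ++ [i + 1] else acc)
      []
    = (PySem.List.enumerate [c1, c2, c3] 0).filterMap
        (fun is => if is.2 = ((PySem.List.max? [c1, c2, c3] (fun y => y)).getD 0)
                   then some (is.1 + 1) else none) := by
  have hr : PySem.List.pyRange 0 3 1 = [0, 1, 2] := by decide
  rw [hr]
  simp only [PySem.List.enumerate_cons, PySem.List.enumerate_nil, List.filterMap,
    PySem.List.max?_id_cons, List.foldl, Option.getD_some]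
  have hm : max (max c1 c2) c3 = max c1 (max c2 c3) := max_assoc c1 c2 c3
  rw [hm]
  norm_num
  split_ifs <;> rfl

-- ===== VERDICT (by name: the statement is the Claim_ definition above) =====
theorem solution_spec : Claim_equal_solution := by
  intro answers _
  unfold Spec_solution solution solution_alt
  dsimp only
  rw [foldl_triple_count]
  dsimp only
  simp only [zero_add]
  rw [cycScore_eq_countP [1, 2, 3, 4, 5] (by decide) answers,
      cycScore_eq_countP [2, 1, 2, 3, 2, 4, 2, 5] (by decide) answers,
      cycScore_eq_countP [3, 3, 1, 1, 2, 2, 4, 4, 5, 5] (by decide) answers]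
  simp only [List.length_cons, List.length_nil]
  exact winners_glue _ _ _
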